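-- pv_equiv track=rewrite | github.com/blokai/blokai | modules/piece.py | text_representation
-- ===== SOURCE A (Python) =====
-- def minima(poly):
--     '''
--        Finds the min x and y coordinate of a polyomino.
--
--        Note that pieces are translated to get minima(poly) == (0, 0)
--        Example:
--            poly = [(0, 1), (1, 0), (1, 1), (1, 2), (2, 1)] # polyomino called X
--            minima(poly) # (0, 0)
--     '''
--     return (min(pt[0] for pt in poly), min(pt[1] for pt in poly))
--
-- def maxima(poly):
--     '''Finds the max x and y coordinate of a polyomino.
--
--     Example:
--         poly = [(0, 0), (0, 1), (0, 2), (1, 0)] # polyomino called L4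
--         maxima(poly) # (1, 2)
--     '''
--     return (max(pt[0] for pt in poly), max(pt[1] for pt in poly))
--
-- def text_representation(poly, char = '#'):
--     '''Generates a textual representation of a polyomino.'''
--     # text_representation_with_corners() outperforms text_representation(),
--     # but we keep it for easier understanding of the code
--     min_pt = minima(poly)
--     max_pt = maxima(poly)
--     table = [[' '] * (max_pt[1] - min_pt[1] + 1)
--              for _ in range(max_pt[0] - min_pt[0] + 1)]
--     for pt in poly:
--         table[pt[0] - min_pt[0]][pt[1] - min_pt[1]] = char
--     return('\n'.join([''.join(row) for row in table]))
-- ===== SOURCE B (Python) =====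
-- def text_representation(poly, char = '#'):
--     '''Generates a textual representation of a polyomino.'''
--     minx = min(pt[0] for pt in poly)
--     miny = min(pt[1] for pt in poly)
--     maxx = max(pt[0] for pt in poly)
--     maxy = max(pt[1] for pt in poly)
--     # group the normalized column indices of the points by row
--     rows = {}
--     for pt in poly:
--         rows.setdefault(pt[0] - minx, set()).add(pt[1] - miny)
--     w = maxy - miny + 1
--     lines = []
--     for i in range(maxx - minx + 1):
--         cols = rows.get(i)
--         if cols is None:
--             row = ' ' * w
--         else:
--             parts = []
--             prev = 0
--             for j in sorted(cols):
--                 parts.append(' ' * (j - prev))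
--                 parts.append(char)
--                 prev = j + 1
--             parts.append(' ' * (w - prev))
--             row = ''.join(parts)
--         lines.append(row)
--     return '\n'.join(lines)
-- ===== Notes on version B (the rewrite author's own statement) =====
-- stated objective: alternative
-- what changed: Replaces A's scatter into a pre-allocated h*w grid of cells (assign char at each point, then join every cell) by a gather: normalized column indices grouped by row in a dict of sets, blank rows emitted as one space-run string and occupied rows rendered run-length from their sorted columns; trades the mutable grid for sorting and run-length string building.
import Mathlib
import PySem

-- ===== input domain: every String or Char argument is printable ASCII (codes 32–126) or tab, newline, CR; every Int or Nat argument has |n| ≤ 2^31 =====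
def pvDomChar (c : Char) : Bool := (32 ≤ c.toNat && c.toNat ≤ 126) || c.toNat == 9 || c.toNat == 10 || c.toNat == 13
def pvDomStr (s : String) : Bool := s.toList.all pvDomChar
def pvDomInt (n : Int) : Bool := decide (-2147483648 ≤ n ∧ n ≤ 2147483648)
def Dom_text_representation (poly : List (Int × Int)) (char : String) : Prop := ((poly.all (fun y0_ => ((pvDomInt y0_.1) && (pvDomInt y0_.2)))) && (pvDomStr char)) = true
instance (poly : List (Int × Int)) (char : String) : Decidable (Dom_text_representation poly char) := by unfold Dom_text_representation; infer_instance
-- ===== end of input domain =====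

-- B replaces A's scatter into a pre-allocated grid of cells by a gather: columns
-- grouped by row, each row rendered run-length from its sorted column set
-- (objective: alternative; same cost class).

-- ===== PORT A =====
-- A scatters each point into a pre-filled table, then joins rows.
-- (poly = [] makes Python's min raise ValueError; that case is outside Pre_, "" here.)
-- The scatter indices pt0 - minx, pt1 - miny are provably nonnegative, so .toNat is exact.
def text_representation (poly : List (Int × Int)) (char : String) : String :=
  match poly with
  | [] => ""
  | p :: ps =>
    let minx : Int := ps.foldl (fun a q => min a q.1) p.1
    let miny : Int := ps.foldl (fun a q => min a q.2) p.2
    let maxx : Int := ps.foldl (fun a q => max a q.1) p.1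
    let maxy : Int := ps.foldl (fun a q => max a q.2) p.2
    let table : List (List String) :=
      List.replicate (maxx - minx + 1).toNat (List.replicate (maxy - miny + 1).toNat " ")
    let table := (p :: ps).foldl
      (fun t q => t.modify (q.1 - minx).toNat (fun row => row.set (q.2 - miny).toNat char)) table
    PySem.Str.join "\n" (table.map (fun row => PySem.Str.join "" row))

-- ===== PORT B =====
-- B groups normalized column indices by row in a dict of sets, then renders each
-- row by run-length gather over the sorted columns (blank rows in one step).
-- pvSpaces n = Python's ' ' * n (empty for n < 0, exactly as in Python).
def pvSpaces (n : Int) : String := String.ofList (List.replicate n.toNat ' ')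

def text_representation_alt (poly : List (Int × Int)) (char : String) : String :=
  match poly with
  | [] => ""
  | p :: ps =>
    let minx : Int := ps.foldl (fun a q => min a q.1) p.1
    let miny : Int := ps.foldl (fun a q => min a q.2) p.2
    let maxx : Int := ps.foldl (fun a q => max a q.1) p.1
    let maxy : Int := ps.foldl (fun a q => max a q.2) p.2
    -- rows.setdefault(pt[0]-minx, set()).add(pt[1]-miny)
    let rows : PySem.Dict Int (PySem.Set Int) :=
      (p :: ps).foldl (fun d pt =>
        d.insert (pt.1 - minx)
          (PySem.Set.add ((d.get? (pt.1 - minx)).getD PySem.Set.empty) (pt.2 - miny)))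
        PySem.Dict.empty
    let w : Int := maxy - miny + 1
    let lines : List String :=
      (PySem.List.pyRange 0 (maxx - minx + 1) 1).foldl (fun acc i =>
        acc ++ [match rows.get? i with
          | none => pvSpaces w
          | some cols =>
            let b := (PySem.List.sorted cols (fun j => j) false).foldl
              (fun (pp : List String × Int) j => (pp.1 ++ [pvSpaces (j - pp.2), char], j + 1))
              ([], 0)
            PySem.Str.join "" (b.1 ++ [pvSpaces (w - b.2)])]) []
    PySem.Str.join "\n" lines

-- ===== PRECONDITION & SPEC =====
-- Pre_ excludes only the empty polyomino, on which Python's min (in both A and B) raises ValueError.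
def Pre_text_representation (poly : List (Int × Int)) (char : String) : Prop := poly ≠ []
instance (poly : List (Int × Int)) (char : String) : Decidable (Pre_text_representation poly char) := by unfold Pre_text_representation; infer_instance
def pvWitness_text_representation : (List (Int × Int)) × String := ([((0 : Int), (1 : Int)), (1, 0), (1, 1)], "#")

def Spec_text_representation (poly : List (Int × Int)) (char : String) (out : String) : Prop := out = text_representation_alt poly char
instance (poly : List (Int × Int)) (char : String) (out : String) : Decidable (Spec_text_representation poly char out) := by unfold Spec_text_representation; infer_instance

-- ===== CLAIM (what is proved, stated in full; the proofs are below) =====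
def Claim_equal_text_representation : Prop := ∀ (poly : List (Int × Int)) (char : String), Dom_text_representation poly char → Pre_text_representation poly char → Spec_text_representation poly char (text_representation poly char)

-- ===== LEMMAS AND PROOFS =====

-- the "gathered" grid of a coordinate list: cell (i, j) is char iff (i, j) occurs in S
def pvCell (S : List (Int × Int)) (char : String) (i j : Nat) : String :=
  if ((i : Int), (j : Int)) ∈ S then char else " "
def pvRow (S : List (Int × Int)) (char : String) (wN i : Nat) : List String :=
  (List.range wN).map (pvCell S char i)
def pvGrid (S : List (Int × Int)) (char : String) (hN wN : Nat) : List (List String) :=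
  (List.range hN).map (pvRow S char wN)

theorem pvGrid_nil (char : String) (hN wN : Nat) :
    pvGrid [] char hN wN = List.replicate hN (List.replicate wN " ") := by
  simp only [pvGrid]
  rw [List.eq_replicate_iff]
  refine ⟨by simp, ?_⟩
  intro row hrow
  rw [List.mem_map] at hrow
  obtain ⟨i, -, rfl⟩ := hrow
  rw [List.eq_replicate_iff]
  refine ⟨by simp [pvRow], ?_⟩
  intro b hb
  rw [pvRow, List.mem_map] at hb
  obtain ⟨j, -, rfl⟩ := hb
  simp [pvCell]

theorem pvRow_extend (S : List (Int × Int)) (char : String) (wN i : Nat) (c : Int × Int)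
    (hne : ∀ j : Int, ((i : Int), j) ≠ c) :
    pvRow (S ++ [c]) char wN i = pvRow S char wN i := by
  unfold pvRow
  apply List.map_congr_left
  intro j _
  simp [pvCell, List.mem_append, hne]

-- one scatter step turns the grid of S into the grid of S ++ [c]
theorem pvGrid_insert (S : List (Int × Int)) (char : String) (hN wN : Nat) (c : Int × Int)
    (h1 : 0 ≤ c.1) (h2 : c.1 < hN) (h3 : 0 ≤ c.2) (h4 : c.2 < wN) :
    (pvGrid S char hN wN).modify c.1.toNat (fun row => row.set c.2.toNat char)
      = pvGrid (S ++ [c]) char hN wN := by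
  unfold pvGrid
  apply List.ext_getElem
  · simp
  · intro i hi hi'
    simp only [List.length_modify, List.length_map, List.length_range] at hi hi'
    rw [List.getElem_modify]
    by_cases hic : c.1.toNat = i
    · rw [if_pos hic]
      subst hic
      simp only [List.getElem_map, List.getElem_range]
      apply List.ext_getElem
      · simp [pvRow]
      · intro j hj hj'
        simp only [pvRow, List.length_set, List.length_map, List.length_range] at hj hj'
        rw [List.getElem_set]
        simp only [pvRow, List.getElem_map, List.getElem_range, pvCell,
          Int.toNat_of_nonneg h1, List.mem_append, List.mem_singleton]
        by_cases hjc : c.2.toNat = j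
        · subst hjc
          rw [Int.toNat_of_nonneg h3, if_pos rfl]
          have : ((c.1, c.2) : Int × Int) = c := rfl
          simp [this]
        · rw [if_neg hjc]
          have hne : ((c.1, (j : Int)) : Int × Int) ≠ c := by
            intro h
            have := congrArg Prod.snd h
            simp at this; omega
          simp [hne]
    · rw [if_neg hic]
      simp only [List.getElem_map, List.getElem_range]
      rw [pvRow_extend]
      intro j h
      have := congrArg Prod.fst h
      simp at this; omega

-- A's whole scatter loop over in-bounds points computes the gathered grid
theorem pvGrid_fold (char : String) (hN wN : Nat) (l : List (Int × Int))
    (f g : Int × Int → Int)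
    (hb : ∀ q ∈ l, 0 ≤ f q ∧ f q < hN ∧ 0 ≤ g q ∧ g q < wN) :
    ∀ S : List (Int × Int),
    l.foldl (fun t q => t.modify (f q).toNat (fun row => row.set (g q).toNat char))
      (pvGrid S char hN wN)
      = pvGrid (S ++ l.map (fun q => (f q, g q))) char hN wN := by
  induction l with
  | nil => simp
  | cons q qs ih =>
    intro S
    obtain ⟨hb1, hb2, hb3, hb4⟩ := hb q (by simp)
    have step := pvGrid_insert S char hN wN (f q, g q) hb1 hb2 hb3 hb4
    simp only [List.foldl_cons, step]
    rw [ih (fun x hx => hb x (by simp [hx]))]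
    simp

theorem pv_foldl_min_le {α : Type} (f : α → Int) (l : List α) (a : Int) :
    l.foldl (fun b x => min b (f x)) a ≤ a ∧ ∀ x ∈ l, l.foldl (fun b x => min b (f x)) a ≤ f x := by
  induction l generalizing a with
  | nil => simp
  | cons y ys ih =>
    refine ⟨le_trans (ih (min a (f y))).1 (min_le_left _ _), ?_⟩
    intro x hx
    rw [List.mem_cons] at hx
    rcases hx with rfl | h
    · exact le_trans (ih (min a (f x))).1 (min_le_right _ _)
    · exact (ih (min a (f y))).2 x h

theorem pv_le_foldl_max {α : Type} (f : α → Int) (l : List α) (a : Int) :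
    a ≤ l.foldl (fun b x => max b (f x)) a ∧ ∀ x ∈ l, f x ≤ l.foldl (fun b x => max b (f x)) a := by
  induction l generalizing a with
  | nil => simp
  | cons y ys ih =>
    refine ⟨le_trans (le_max_left _ _) (ih (max a (f y))).1, ?_⟩
    intro x hx
    rw [List.mem_cons] at hx
    rcases hx with rfl | h
    · exact le_trans (le_max_right _ _) (ih (max a (f x))).1
    · exact (ih (max a (f y))).2 x h

theorem pv_pyRange_map {β : Type} (n : Int) (F : Int → β) :
    (PySem.List.pyRange 0 n 1).map F = (List.range n.toNat).map (fun k : Nat => F (k : Int)) := by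
  rw [PySem.List.pyRange_one]
  simp [List.map_map, Function.comp_def]

-- ---- B-side ----
def pvMemG (d : PySem.Dict Int (PySem.Set Int)) (i j : Int) : Prop :=
  match d.get? i with
  | none => False
  | some s => j ∈ s

def pvGroup (S : List (Int × Int)) (d : PySem.Dict Int (PySem.Set Int)) :
    PySem.Dict Int (PySem.Set Int) :=
  S.foldl (fun d c => d.insert c.1 (PySem.Set.add ((d.get? c.1).getD PySem.Set.empty) c.2)) d

theorem pvGroup_mem (S : List (Int × Int)) (d : PySem.Dict Int (PySem.Set Int)) (i j : Int) :
    pvMemG (pvGroup S d) i j ↔ pvMemG d i j ∨ (i, j) ∈ S := by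
  induction S generalizing d with
  | nil => simp [pvGroup]
  | cons c T ih =>
    show pvMemG (pvGroup T _) i j ↔ _
    rw [ih]
    have hins : pvMemG (d.insert c.1 (PySem.Set.add ((d.get? c.1).getD PySem.Set.empty) c.2)) i j
        ↔ (if i = c.1 then j ∈ PySem.Set.add ((d.get? c.1).getD PySem.Set.empty) c.2
           else pvMemG d i j) := by
      unfold pvMemG
      rw [PySem.Dict.get?_insert]
      split_ifs <;> rfl
    rw [hins]
    by_cases hic : i = c.1
    · subst hic
      rw [if_pos rfl, PySem.Set.mem_add]
      rcases hget : d.get? c.1 with _ | s <;>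
        simp [pvMemG, hget, PySem.Set.empty, List.mem_cons, Prod.ext_iff] <;>
        tauto
    · rw [if_neg hic]
      have : (i, j) ≠ c := by intro h; exact hic (congrArg Prod.fst h)
      simp [List.mem_cons, this]

theorem pvGroup_none (S : List (Int × Int)) (d : PySem.Dict Int (PySem.Set Int)) (i : Int) :
    (pvGroup S d).get? i = none ↔ d.get? i = none ∧ ∀ j, (i, j) ∉ S := by
  induction S generalizing d with
  | nil => simp [pvGroup]
  | cons c T ih =>
    show (pvGroup T _).get? i = none ↔ _
    rw [ih, PySem.Dict.get?_insert]
    by_cases hic : i = c.1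
    · subst hic
      rw [if_pos rfl]
      constructor
      · rintro ⟨h, -⟩; simp at h
      · rintro ⟨-, h⟩
        exact (h c.2 (by rw [List.mem_cons]; left; rfl)).elim
    · rw [if_neg hic]
      have hne : ∀ j, (i, j) ≠ c := by intro j h; exact hic (congrArg Prod.fst h)
      constructor
      · rintro ⟨h1, h2⟩
        exact ⟨h1, fun j hj => by rw [List.mem_cons] at hj; rcases hj with h | h; exact hne j h; exact h2 j h⟩
      · rintro ⟨h1, h2⟩
        exact ⟨h1, fun j hj => h2 j (by rw [List.mem_cons]; right; exact hj)⟩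

theorem pvGroup_nodup (S : List (Int × Int)) (d : PySem.Dict Int (PySem.Set Int))
    (h : ∀ i s, d.get? i = some s → s.Nodup) :
    ∀ i s, (pvGroup S d).get? i = some s → s.Nodup := by
  induction S generalizing d with
  | nil => exact h
  | cons c T ih =>
    apply ih
    intro i s hs
    rw [PySem.Dict.get?_insert] at hs
    by_cases hic : i = c.1
    · rw [if_pos hic] at hs
      cases hs
      apply PySem.Set.nodup_add
      rcases hget : d.get? c.1 with _ | s0
      · simp [hget, PySem.Set.empty]
      · exact h c.1 s0 hget
    · rw [if_neg hic] at hs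
      exact h i s hs

theorem pv_flatten_const (c : Char) (n : Nat) :
    ((List.range n).map (fun _ => [c])).flatten = List.replicate n c := by
  induction n with
  | zero => simp
  | succ m ih => rw [List.range_succ]; simp [ih, List.replicate_succ']

theorem pv_chars_join_empty (pieces : List (List Char)) :
    PySem.Chars.join [] pieces = pieces.flatten := by
  induction pieces with
  | nil => simp [PySem.Chars.join_nil]
  | cons p rest ih =>
    cases rest with
    | nil => simp [PySem.Chars.join_singleton]
    | cons q r => rw [PySem.Chars.join_cons_cons]; simp at ih ⊢; simp [ih]

theorem pv_join_empty (parts : List String) :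
    (PySem.Str.join "" parts).toList = (parts.map String.toList).flatten := by
  rw [PySem.Str.toList_join]
  have : ("" : String).toList = [] := rfl
  rw [this, pv_chars_join_empty]

def pvCells (char : String) (T : List Int) (a w : Int) : List (List Char) :=
  (List.range (w - a).toNat).map (fun (k : Nat) => if a + (k : Int) ∈ T then char.toList else [' '])

theorem pv_cells_nil (char : String) (a w : Int) :
    (pvCells char [] a w).flatten = List.replicate (w - a).toNat ' ' := by
  unfold pvCells
  rw [← pv_flatten_const ' ' (w - a).toNat]
  apply congrArg
  apply List.map_congr_left
  intro k _
  simp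

theorem pv_cells_split (char : String) (w a j : Int) (rest : List Int)
    (ha : a ≤ j) (hj : j < w) (hrest : ∀ x ∈ rest, j < x) :
    (pvCells char (j :: rest) a w).flatten
    = List.replicate (j - a).toNat ' ' ++ char.toList ++ (pvCells char rest (j + 1) w).flatten := by
  unfold pvCells
  have e : (w - a).toNat = (j - a).toNat + (1 + (w - (j + 1)).toNat) := by omega
  rw [e, List.range_add, List.range_add]
  simp only [List.map_append, List.flatten_append, List.map_map]
  rw [List.append_assoc]
  congr 1
  · -- spaces before j
    rw [← pv_flatten_const ' ' (j - a).toNat]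
    apply congrArg
    apply List.map_congr_left
    intro k hk
    rw [List.mem_range] at hk
    have hne : a + (k : Int) ≠ j := by omega
    have hnr : a + (k : Int) ∉ rest := by
      intro hm; have := hrest _ hm; omega
    rw [if_neg (by rw [List.mem_cons]; rintro (h | h); exact hne h; exact hnr h)]
  · -- the char at j, then the shifted tail
    simp only [List.range_one, List.map_cons, List.map_nil, List.flatten_cons, List.flatten_nil,
      Function.comp_apply, List.flatten_append]
    congr 1
    · have hpos : a + (((j - a).toNat + 0 : Nat) : Int) = j := by push_cast; omega
      rw [hpos, if_pos (by rw [List.mem_cons]; left; rfl)]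
      simp
    · apply congrArg
      apply List.map_congr_left
      intro k hk
      simp only [Function.comp_apply]
      have hidx : a + (((j - a).toNat + (1 + k) : Nat) : Int) = (j + 1) + (k : Int) := by
        push_cast; omega
      simp only [hidx]
      have hiff : ((j + 1) + (k : Int) ∈ j :: rest) ↔ ((j + 1) + (k : Int) ∈ rest) := by
        rw [List.mem_cons]
        have : (j + 1) + (k : Int) ≠ j := by omega
        tauto
      rw [if_congr hiff rfl rfl]

theorem pv_runlen (char : String) (w : Int) (T : List Int) :
    ∀ (acc : List String) (a : Int), 0 ≤ a → a ≤ w → T.Pairwise (· < ·) →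
    (∀ j ∈ T, a ≤ j ∧ j < w) →
    (((T.foldl (fun (pp : List String × Int) j => (pp.1 ++ [pvSpaces (j - pp.2), char], j + 1))
        (acc, a)).1 ++
      [pvSpaces (w - (T.foldl (fun (pp : List String × Int) j =>
        (pp.1 ++ [pvSpaces (j - pp.2), char], j + 1)) (acc, a)).2)]).map String.toList).flatten
    = (acc.map String.toList).flatten ++ (pvCells char T a w).flatten := by
  induction T with
  | nil =>
    intro acc a h0 hw _ _
    rw [pv_cells_nil]
    simp [pvSpaces]
  | cons j rest ih =>
    intro acc a h0 hw hs hb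
    rw [List.pairwise_cons] at hs
    obtain ⟨hja, hjw⟩ := hb j (by simp)
    simp only [List.foldl_cons]
    rw [ih (acc ++ [pvSpaces (j - a), char]) (j + 1) (by omega) (by omega) hs.2
      (fun x hx => ⟨by have := hs.1 x hx; omega, (hb x (by simp [hx])).2⟩)]
    rw [pv_cells_split char w a j rest hja hjw hs.1]
    simp [pvSpaces]

theorem pv_row_none (char : String) (S : List (Int × Int)) (w : Int) (i : Nat)
    (h : ∀ j, ((i : Int), j) ∉ S) :
    PySem.Str.join "" (pvRow S char w.toNat i) = pvSpaces w := by
  apply String.toList_inj.mp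
  rw [pv_join_empty]
  have : (pvRow S char w.toNat i).map String.toList = (List.range w.toNat).map (fun _ => [' ']) := by
    simp only [pvRow, List.map_map]
    apply List.map_congr_left
    intro k _
    simp [Function.comp_apply, pvCell, h]
  rw [this, pv_flatten_const]
  simp [pvSpaces]

theorem pv_row_some (char : String) (S : List (Int × Int)) (w : Int) (i : Nat)
    (cols : PySem.Set Int) (hw : 0 ≤ w) (hnd : cols.Nodup)
    (hmem : ∀ j, j ∈ cols ↔ ((i : Int), j) ∈ S)
    (hbound : ∀ c ∈ S, 0 ≤ c.2 ∧ c.2 < w) :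
    PySem.Str.join "" (pvRow S char w.toNat i)
    = PySem.Str.join ""
        (((PySem.List.sorted cols (fun j => j) false).foldl
            (fun (pp : List String × Int) j => (pp.1 ++ [pvSpaces (j - pp.2), char], j + 1))
            ([], 0)).1
          ++ [pvSpaces (w - ((PySem.List.sorted cols (fun j => j) false).foldl
            (fun (pp : List String × Int) j => (pp.1 ++ [pvSpaces (j - pp.2), char], j + 1))
            ([], 0)).2)]) := by
  have hperm := PySem.List.sorted_perm cols (fun j => j) false
  have hnd2 : (PySem.List.sorted cols (fun j => j) false).Nodup := hperm.nodup_iff.mpr hnd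
  have hple : (PySem.List.sorted cols (fun j => j) false).Pairwise (· ≤ ·) := by
    simpa using PySem.List.sorted_pairwise cols (fun j => j)
  have hplt : (PySem.List.sorted cols (fun j => j) false).Pairwise (· < ·) :=
    (hple.and hnd2).imp (fun h => lt_of_le_of_ne h.1 h.2)
  have hbs : ∀ j ∈ PySem.List.sorted cols (fun j => j) false, (0 : Int) ≤ j ∧ j < w := by
    intro j hj
    rw [PySem.List.mem_sorted] at hj
    exact hbound _ ((hmem j).mp hj)
  apply String.toList_inj.mp
  rw [pv_join_empty, pv_join_empty]
  rw [pv_runlen char w (PySem.List.sorted cols (fun j => j) false) [] 0 le_rfl hw hplt hbs]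
  simp only [List.map_nil, List.flatten_nil, List.nil_append]
  unfold pvRow pvCells
  simp only [List.map_map, Int.sub_zero]
  apply congrArg
  apply List.map_congr_left
  intro k _
  simp only [Function.comp_apply, pvCell, zero_add, apply_ite String.toList]
  have hiff : (((i : Int), (k : Int)) ∈ S) ↔ ((k : Int) ∈ PySem.List.sorted cols (fun j => j) false) := by
    rw [PySem.List.mem_sorted, hmem]
  rw [if_congr hiff rfl (show (" " : String).toList = [' '] by decide)]

theorem pv_rows_eq (l : List (Int × Int)) (minx miny : Int) :
    l.foldl (fun d pt =>
      d.insert (pt.1 - minx)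
        (PySem.Set.add ((d.get? (pt.1 - minx)).getD PySem.Set.empty) (pt.2 - miny)))
      PySem.Dict.empty
    = pvGroup (l.map (fun q => (q.1 - minx, q.2 - miny))) PySem.Dict.empty := by
  unfold pvGroup
  rw [List.foldl_map]

-- the joined outputs of scatter (A) and run-length gather (B) agree
theorem pv_core (l : List (Int × Int)) (char : String) (minx miny maxx maxy : Int)
    (hb : ∀ q ∈ l, minx ≤ q.1 ∧ miny ≤ q.2 ∧ q.1 ≤ maxx ∧ q.2 ≤ maxy)
    (hx : minx ≤ maxx) (hy : miny ≤ maxy) :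
    PySem.Str.join "\n"
      ((l.foldl (fun t q => t.modify (q.1 - minx).toNat (fun row => row.set (q.2 - miny).toNat char))
        (List.replicate (maxx - minx + 1).toNat (List.replicate (maxy - miny + 1).toNat " "))).map
        (fun row => PySem.Str.join "" row))
    = PySem.Str.join "\n"
        ((PySem.List.pyRange 0 (maxx - minx + 1) 1).foldl (fun acc i =>
          acc ++ [match (pvGroup (l.map (fun q => (q.1 - minx, q.2 - miny))) PySem.Dict.empty).get? i with
            | none => pvSpaces (maxy - miny + 1)
            | some cols =>
              let b := (PySem.List.sorted cols (fun j => j) false).foldl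
                (fun (pp : List String × Int) j => (pp.1 ++ [pvSpaces (j - pp.2), char], j + 1))
                ([], 0)
              PySem.Str.join "" (b.1 ++ [pvSpaces ((maxy - miny + 1) - b.2)])]) []) := by
  rw [← pvGrid_nil char (maxx - minx + 1).toNat (maxy - miny + 1).toNat,
      pvGrid_fold char (maxx - minx + 1).toNat (maxy - miny + 1).toNat l
        (fun q => q.1 - minx) (fun q => q.2 - miny)
        (by
          intro q hq
          obtain ⟨a, b, c, d⟩ := hb q hq
          show 0 ≤ q.1 - minx ∧ q.1 - minx < ((maxx - minx + 1).toNat : Int) ∧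
            0 ≤ q.2 - miny ∧ q.2 - miny < ((maxy - miny + 1).toNat : Int)
          omega)]
  rw [List.nil_append]
  have hfold : (PySem.List.pyRange 0 (maxx - minx + 1) 1).foldl (fun acc i =>
        acc ++ [match (pvGroup (l.map (fun q => (q.1 - minx, q.2 - miny))) PySem.Dict.empty).get? i with
          | none => pvSpaces (maxy - miny + 1)
          | some cols =>
            let b := (PySem.List.sorted cols (fun j => j) false).foldl
              (fun (pp : List String × Int) j => (pp.1 ++ [pvSpaces (j - pp.2), char], j + 1))
              ([], 0)
            PySem.Str.join "" (b.1 ++ [pvSpaces ((maxy - miny + 1) - b.2)])]) []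
      = (PySem.List.pyRange 0 (maxx - minx + 1) 1).map
          (fun i => match (pvGroup (l.map (fun q => (q.1 - minx, q.2 - miny))) PySem.Dict.empty).get? i with
          | none => pvSpaces (maxy - miny + 1)
          | some cols =>
            let b := (PySem.List.sorted cols (fun j => j) false).foldl
              (fun (pp : List String × Int) j => (pp.1 ++ [pvSpaces (j - pp.2), char], j + 1))
              ([], 0)
            PySem.Str.join "" (b.1 ++ [pvSpaces ((maxy - miny + 1) - b.2)])) := by
    simpa using PySem.List.foldl_append_singleton_eq_map
      (fun i => match (pvGroup (l.map (fun q => (q.1 - minx, q.2 - miny))) PySem.Dict.empty).get? i with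
        | none => pvSpaces (maxy - miny + 1)
        | some cols =>
          let b := (PySem.List.sorted cols (fun j => j) false).foldl
            (fun (pp : List String × Int) j => (pp.1 ++ [pvSpaces (j - pp.2), char], j + 1))
            ([], 0)
          PySem.Str.join "" (b.1 ++ [pvSpaces ((maxy - miny + 1) - b.2)]))
      (PySem.List.pyRange 0 (maxx - minx + 1) 1) []
  rw [hfold, pv_pyRange_map]
  congr 1
  simp only [pvGrid, List.map_map]
  apply List.map_congr_left
  intro i hi
  simp only [Function.comp_apply]
  have hbound : ∀ c ∈ l.map (fun q => (q.1 - minx, q.2 - miny)), 0 ≤ c.2 ∧ c.2 < maxy - miny + 1 := by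
    intro c hc
    rw [List.mem_map] at hc
    obtain ⟨q, hq, rfl⟩ := hc
    obtain ⟨_, _, _, _⟩ := hb q hq
    constructor <;> [skip; skip] <;> simp <;> omega
  rcases hg : (pvGroup (l.map (fun q => (q.1 - minx, q.2 - miny))) PySem.Dict.empty).get? ((i : Nat) : Int)
    with _ | cols
  · simp only [hg]
    exact pv_row_none char _ (maxy - miny + 1) i
      (fun j => ((pvGroup_none _ _ _).mp hg).2 j)
  · simp only [hg]
    apply pv_row_some char _ (maxy - miny + 1) i cols (by omega)
    · exact pvGroup_nodup _ PySem.Dict.empty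
        (by intro i' s' h'; rw [PySem.Dict.get?_empty] at h'; cases h') _ cols hg
    · intro j
      have h2 := pvGroup_mem (l.map (fun q => (q.1 - minx, q.2 - miny))) PySem.Dict.empty ((i : Nat) : Int) j
      simp only [pvMemG, hg, PySem.Dict.get?_empty] at h2
      simpa using h2
    · exact hbound

-- ===== VERDICT (by name: the statement is the Claim_ definition above) =====
theorem text_representation_spec : Claim_equal_text_representation := by
  unfold Claim_equal_text_representation
  intro poly char _ hpre
  unfold Spec_text_representation
  cases poly with
  | nil => exact absurd rfl hpre
  | cons p ps =>
    simp only [text_representation, text_representation_alt]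
    rw [pv_rows_eq]
    apply pv_core
    · intro q hq
      rw [List.mem_cons] at hq
      rcases hq with rfl | h
      · exact ⟨(pv_foldl_min_le (fun q => q.1) ps q.1).1,
               (pv_foldl_min_le (fun q => q.2) ps q.2).1,
               (pv_le_foldl_max (fun q => q.1) ps q.1).1,
               (pv_le_foldl_max (fun q => q.2) ps q.2).1⟩
      · exact ⟨(pv_foldl_min_le (fun q => q.1) ps p.1).2 q h,
               (pv_foldl_min_le (fun q => q.2) ps p.2).2 q h,
               (pv_le_foldl_max (fun q => q.1) ps p.1).2 q h,
               (pv_le_foldl_max (fun q => q.2) ps p.2).2 q h⟩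
    · exact le_trans (pv_foldl_min_le (fun q => q.1) ps p.1).1
        (pv_le_foldl_max (fun q => q.1) ps p.1).1
    · exact le_trans (pv_foldl_min_le (fun q => q.2) ps p.2).1
        (pv_le_foldl_max (fun q => q.2) ps p.2).1
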